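-- pv_equiv track=rewrite | github.com/kushalsamant/ask-dar-zine | monthly_curator.py | organize_images_by_style
-- ===== SOURCE A (Python) =====
-- def organize_images_by_style(images):
--     """Organize images by style for better presentation"""
--     style_groups = {}
--
--     for image in images:
--         style = image['style']
--         if style not in style_groups:
--             style_groups[style] = []
--         style_groups[style].append(image)
--
--     # Sort images within each style by date
--     for style in style_groups:
--         style_groups[style].sort(key=lambda x: x['date'])
--
--     return style_groups
-- ===== SOURCE B (Python) =====
-- def organize_images_by_style(images):
--     """Organize images by style for better presentation"""
--     groups = {image['style']: [] for image in images}
--     for image in sorted(images, key=lambda x: x['date']):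
--         groups[image['style']].append(image)
--     return groups
-- ===== Notes on version B (the rewrite author's own statement) =====
-- stated objective: simpler
-- what changed: Instead of grouping first and then sorting each group, B sorts the whole list once by date (stable) and does a single grouping pass over the sorted list, pre-seeding the keys in first-appearance order so the dict's key order matches A's.
import Mathlib
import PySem

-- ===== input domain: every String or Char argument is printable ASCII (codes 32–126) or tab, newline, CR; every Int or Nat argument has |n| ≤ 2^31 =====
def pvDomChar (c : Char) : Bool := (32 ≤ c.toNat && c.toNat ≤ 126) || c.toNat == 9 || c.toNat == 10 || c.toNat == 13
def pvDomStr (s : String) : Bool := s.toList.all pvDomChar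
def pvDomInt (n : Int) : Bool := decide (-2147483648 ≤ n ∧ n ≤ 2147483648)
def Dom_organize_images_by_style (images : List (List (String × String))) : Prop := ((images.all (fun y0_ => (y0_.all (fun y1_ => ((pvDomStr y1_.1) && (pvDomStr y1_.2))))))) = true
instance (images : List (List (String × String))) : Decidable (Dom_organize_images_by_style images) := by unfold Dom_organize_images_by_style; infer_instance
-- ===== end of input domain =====

-- B replaces A's group-then-sort-each-group with one global stable sort by date followed by a
-- single grouping pass (keys pre-seeded in first-appearance order); RETURN-value equivalence only.

-- image[k] for an image given as an association list (first match, like a Python dict lookup)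
def pvImgGet (img : List (String × String)) (k : String) : String :=
  (PySem.Dict.mk img).getD k ""

-- ===== PORT A =====
def organize_images_by_style (images : List (List (String × String))) : List (String × List (List (String × String))) :=
  let style_groups : PySem.Dict String (List (List (String × String))) :=
    images.foldl (fun d image =>
      let style := pvImgGet image "style"
      let d := if d.contains style then d else d.insert style []
      d.modify style [] (fun l => l ++ [image])) (PySem.Dict.mk [])
  -- for style in style_groups: style_groups[style].sort(key=lambda x: x['date'])
  let style_groups :=
    style_groups.keys.foldl (fun d style =>
      d.modify style [] (fun l => PySem.List.sorted l (fun x => pvImgGet x "date") false)) style_groups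
  style_groups.items

-- ===== PORT B =====
def organize_images_by_style_alt (images : List (List (String × String))) : List (String × List (List (String × String))) :=
  let groups : PySem.Dict String (List (List (String × String))) :=
    images.foldl (fun d image => d.insert (pvImgGet image "style") []) (PySem.Dict.mk [])
  let groups :=
    (PySem.List.sorted images (fun x => pvImgGet x "date") false).foldl
      (fun d image => d.modify (pvImgGet image "style") [] (fun l => l ++ [image])) groups
  groups.items

-- ===== PRECONDITION & SPEC =====
-- Pre_ excludes exactly the inputs on which Python A raises KeyError: an image without a
-- 'style' key or without a 'date' key.
def Pre_organize_images_by_style (images : List (List (String × String))) : Prop :=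
  ∀ img ∈ images, (PySem.Dict.mk img).contains "style" = true ∧ (PySem.Dict.mk img).contains "date" = true
instance (images : List (List (String × String))) : Decidable (Pre_organize_images_by_style images) := by unfold Pre_organize_images_by_style; infer_instance

def pvWitness_organize_images_by_style : (List (List (String × String))) :=
  [[("style", "a"), ("date", "2020-01")], [("style", "b"), ("date", "2019-05")]]

def Spec_organize_images_by_style (images : List (List (String × String))) (out : List (String × List (List (String × String)))) : Prop := out = organize_images_by_style_alt images
instance (images : List (List (String × String))) (out : List (String × List (List (String × String)))) : Decidable (Spec_organize_images_by_style images out) := by unfold Spec_organize_images_by_style; infer_instance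

-- ===== CLAIM (what is proved, stated in full; the proofs are below) =====
def Claim_equal_organize_images_by_style : Prop := ∀ (images : List (List (String × String))), Dom_organize_images_by_style images → Pre_organize_images_by_style images → Spec_organize_images_by_style images (organize_images_by_style images)

-- ===== LEMMAS AND PROOFS =====

-- A's "if style not in d: d[style] = []; d[style].append(img)" is just a modify with default [].
theorem pvA_step (d : PySem.Dict String (List (List (String × String)))) (s : String)
    (img : List (String × String)) :
    (if d.contains s then d else d.insert s []).modify s [] (fun l => l ++ [img])
      = d.modify s [] (fun l => l ++ [img]) := by
  by_cases h : d.contains s = true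
  · simp [h]
  · have hf : d.contains s = false := Bool.eq_false_iff.mpr h
    simp only [hf, Bool.false_eq_true, if_false, PySem.Dict.modify,
      PySem.Dict.getD_insert_self, PySem.Dict.insert_insert_self,
      PySem.Dict.getD_of_not_contains d ([] : List (List (String × String))) hf]

-- a fold of "insert k []" leaves every getD-with-[] at []
theorem pvGetD_seed (l : List (List (String × String)))
    (d : PySem.Dict String (List (List (String × String))))
    (h : ∀ c, d.getD c [] = []) (c : String) :
    (l.foldl (fun d image => d.insert (pvImgGet image "style") []) d).getD c [] = [] := by
  induction l generalizing d with
  | nil => exact h c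
  | cons x t ih =>
      refine ih _ (fun c' => ?_)
      rw [PySem.Dict.getD_insert]
      split <;> simp [h]

-- fold of modify over a Nodup key list: each key modified exactly once
theorem pvGetD_foldl_modify_keys (ks : List String)
    (d : PySem.Dict String (List (List (String × String))))
    (g : List (List (String × String)) → List (List (String × String)))
    (hnd : ks.Nodup) (c : String) :
    (ks.foldl (fun d k => d.modify k [] g) d).getD c []
      = if c ∈ ks then g (d.getD c []) else d.getD c [] := by
  induction ks generalizing d with
  | nil => simp
  | cons k t ih =>
      simp only [List.nodup_cons] at hnd
      simp only [List.foldl_cons, List.mem_cons]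
      rw [ih _ hnd.2]
      by_cases hc : c ∈ t
      · have : c ≠ k := fun h => hnd.1 (h ▸ hc)
        simp [hc, this, PySem.Dict.getD_modify_of_ne _ _ _ this]
      · by_cases hck : c = k
        · subst hck; simp [hc, PySem.Dict.getD_modify_self]
        · simp [hc, hck, PySem.Dict.getD_modify_of_ne _ _ _ hck]

-- Set.update adds nothing when every element is already present
theorem pvSet_update_of_subset (xs s : List String) (h : ∀ x ∈ xs, x ∈ s) :
    PySem.Set.update s xs = s := by
  induction xs generalizing s with
  | nil => rfl
  | cons x t ih =>
      have hxm : x ∈ s := h x List.mem_cons_self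
      have hx : PySem.Set.add s x = s := by
        simp [PySem.Set.add, PySem.Set.contains, hxm]
      simp only [PySem.Set.update, List.foldl_cons] at *
      rw [hx]
      exact ih s (fun y hy => h y (List.mem_cons_of_mem _ hy))

-- filtering commutes with inserting into a key-sorted list (stability)
theorem pvFilter_insertBy {α : Type} (key : α → String) (p : α → Bool) (x : α) (ys : List α)
    (h : ys.Pairwise (fun a b => key a ≤ key b)) :
    (PySem.List.insertBy (fun a b => decide (key a < key b)) x ys).filter p
      = if p x then PySem.List.insertBy (fun a b => decide (key a < key b)) x (ys.filter p)
        else ys.filter p := by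
  induction ys with
  | nil => simp [PySem.List.insertBy]; split <;> simp_all
  | cons y t ih =>
      rw [List.pairwise_cons] at h
      by_cases hb : key x < key y
      · simp only [PySem.List.insertBy, hb, decide_true, if_true]
        by_cases hp : p x = true
        · rw [List.filter_cons_of_pos hp, if_pos hp]
          by_cases hq : p y = true
          · rw [List.filter_cons_of_pos hq]
            simp [PySem.List.insertBy, hb]
          · rw [List.filter_cons_of_neg (by simpa using hq)]
            cases hft : t.filter p with
            | nil => simp [PySem.List.insertBy]
            | cons z zs =>
                have hz : z ∈ t := List.mem_of_mem_filter (hft ▸ List.mem_cons_self)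
                have : key x < key z := lt_of_lt_of_le hb (h.1 z hz)
                simp [PySem.List.insertBy, this]
        · rw [List.filter_cons_of_neg (by simpa using hp), if_neg hp]
      · simp only [PySem.List.insertBy, hb, decide_false, Bool.false_eq_true, if_false]
        by_cases hq : p y = true
        · rw [List.filter_cons_of_pos hq, List.filter_cons_of_pos hq, ih h.2]
          by_cases hp : p x = true
          · simp only [hp, if_true, PySem.List.insertBy, hb, decide_false,
              Bool.false_eq_true, if_false]
          · simp [hp]
        · rw [List.filter_cons_of_neg (by simpa using hq),
              List.filter_cons_of_neg (by simpa using hq), ih h.2]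

theorem pvSorted_append_singleton {α : Type} (key : α → String) (xs : List α) (x : α) :
    PySem.List.sorted (xs ++ [x]) key false
      = PySem.List.insertBy (fun a b => decide (key a < key b)) x (PySem.List.sorted xs key false) := by
  rw [PySem.List.sorted_eq_foldl_insertBy, PySem.List.sorted_eq_foldl_insertBy, List.foldl_append]
  rfl

-- a stable sort commutes with filtering
theorem pvFilter_sorted {α : Type} (key : α → String) (p : α → Bool) (xs : List α) :
    (PySem.List.sorted xs key false).filter p = PySem.List.sorted (xs.filter p) key false := by
  induction xs using List.reverseRecOn with
  | nil => simp [PySem.List.sorted]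
  | append_singleton t x ih =>
      rw [pvSorted_append_singleton,
        pvFilter_insertBy key p x _ (PySem.List.sorted_pairwise t key),
        List.filter_append, ih]
      by_cases hp : p x = true
      · simp only [hp, if_true, List.filter_cons_of_pos hp, List.filter_nil,
          pvSorted_append_singleton]
      · simp [hp, List.filter_cons_of_neg (by simpa using hp)]

-- the grouping pass: getD of the modify-append fold is the filtered sublist
theorem pvGetD_group (l : List (List (String × String)))
    (d : PySem.Dict String (List (List (String × String)))) (c : String) :
    (l.foldl (fun d image => d.modify (pvImgGet image "style") [] (fun v => v ++ [image])) d).getD c []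
      = d.getD c [] ++ l.filter (fun image => pvImgGet image "style" == c) := by
  have h1 : l.foldl (fun d image => d.modify (pvImgGet image "style") [] (fun v => v ++ [image])) d
      = (l.map (fun image => (pvImgGet image "style", image))).foldl
          (fun d p => d.modify p.1 [] (fun v => v ++ [p.2])) d := by
    rw [List.foldl_map]
  rw [h1, PySem.Dict.getD_foldl_modify_append, List.filter_map, List.map_map]
  simp [Function.comp_def]

-- ===== VERDICT (by name: the statement is the Claim_ definition above) =====
theorem organize_images_by_style_spec : Claim_equal_organize_images_by_style := by
  intro images _ _
  show organize_images_by_style images = organize_images_by_style_alt images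
  unfold organize_images_by_style organize_images_by_style_alt
  simp only []
  -- rewrite A's first loop into a plain modify loop
  rw [PySem.List.foldl_congr_mem images
      (fun d image =>
        (if d.contains (pvImgGet image "style") then d else d.insert (pvImgGet image "style") []).modify
          (pvImgGet image "style") [] (fun l => l ++ [image]))
      (fun d image => d.modify (pvImgGet image "style") [] (fun l => l ++ [image]))
      (PySem.Dict.mk [])
      (fun d image _ => pvA_step d (pvImgGet image "style") image)]
  set sKey : List (String × String) → String := fun image => pvImgGet image "style" with hsKey
  set dKey : List (String × String) → String := fun image => pvImgGet image "date" with hdKey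
  set sg : PySem.Dict String (List (List (String × String))) :=
    images.foldl (fun d image => d.modify (sKey image) [] (fun l => l ++ [image])) (PySem.Dict.mk [])
    with hsg
  set g0 : PySem.Dict String (List (List (String × String))) :=
    images.foldl (fun d image => d.insert (sKey image) []) (PySem.Dict.mk []) with hg0
  set g1 : PySem.Dict String (List (List (String × String))) :=
    (PySem.List.sorted images dKey false).foldl
      (fun d image => d.modify (sKey image) [] (fun l => l ++ [image])) g0 with hg1
  set sg2 : PySem.Dict String (List (List (String × String))) :=
    sg.keys.foldl (fun d style =>
      d.modify style [] (fun l => PySem.List.sorted l dKey false)) sg with hsg2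
  -- keys
  have hk_sg : sg.keys = PySem.Set.ofList (images.map sKey) := by
    rw [hsg, PySem.Dict.keys_foldl_modify_key]
    simp [PySem.Set.ofList_eq_foldl, PySem.Set.update, PySem.Dict.keys]
  have hnd_sg : sg.keys.Nodup := by
    rw [hk_sg]; exact PySem.Set.nodup_ofList _
  have hk_g0 : g0.keys = PySem.Set.ofList (images.map sKey) := by
    rw [hg0, PySem.Dict.keys_foldl_insert_key]
    simp [PySem.Set.ofList_eq_foldl, PySem.Set.update, PySem.Dict.keys]
  have hk_g1 : g1.keys = g0.keys := by
    rw [hg1, PySem.Dict.keys_foldl_modify_key, pvSet_update_of_subset]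
    intro x hx
    rw [List.mem_map] at hx
    obtain ⟨img, himg, rfl⟩ := hx
    rw [hk_g0]
    exact (PySem.Set.mem_ofList _ _).mpr (List.mem_map_of_mem
      ((PySem.List.mem_sorted _ _ _ _).mp himg))
  have hk_sg2 : sg2.keys = sg.keys := by
    have : sg.keys.foldl (fun d style =>
        d.modify style [] (fun l => PySem.List.sorted l dKey false)) sg
        = (sg.keys.map (fun s => s)).foldl (fun d p =>
            d.modify p [] (fun l => PySem.List.sorted l dKey false)) sg := by
      rw [List.map_id']
    rw [hsg2, this, List.foldl_map, PySem.Dict.keys_foldl_modify_key, pvSet_update_of_subset]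
    intro x hx
    simpa using hx
  have hnd_sg2 : sg2.keys.Nodup := hk_sg2 ▸ hnd_sg
  have hnd_g1 : g1.keys.Nodup := by rw [hk_g1, hk_g0]; exact PySem.Set.nodup_ofList _
  -- values
  have hv_sg : ∀ c, sg.getD c [] = images.filter (fun image => sKey image == c) := by
    intro c; rw [hsg, pvGetD_group]; rfl
  have hv_g0 : ∀ c, g0.getD c [] = [] := by
    intro c; rw [hg0]; exact pvGetD_seed images _ (fun _ => rfl) c
  have hv_g1 : ∀ c, g1.getD c []
      = (PySem.List.sorted images dKey false).filter (fun image => sKey image == c) := by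
    intro c; rw [hg1, pvGetD_group, hv_g0]; rfl
  have hv_sg2 : ∀ c, c ∈ sg.keys →
      sg2.getD c [] = PySem.List.sorted (images.filter (fun image => sKey image == c)) dKey false := by
    intro c hc
    rw [hsg2, pvGetD_foldl_modify_keys _ _ _ hnd_sg, if_pos hc, hv_sg]
  -- items
  rw [PySem.Dict.items_eq_map_keys sg2 hnd_sg2 [], PySem.Dict.items_eq_map_keys g1 hnd_g1 []]
  rw [hk_sg2, hk_g1, hk_g0, ← hk_sg]
  refine List.map_congr_left (fun c hc => ?_)
  rw [hv_sg2 c hc, hv_g1 c, pvFilter_sorted dKey (fun image => sKey image == c) images]
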